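-- pv_equiv track=rewrite | github.com/MrBrantCode/unitest_baseline | mut_generate/mist_train_cf/cf_1801/solution.py | join_strings
-- ===== SOURCE A (Python) =====
-- class EmptyListException(Exception):
--     """Custom exception for empty list."""
--     def __init__(self):
--         super().__init__("The list cannot be empty.")
--
-- def join_strings(words):
--     """
--     Join a list of strings into a single sentence in alternating case, excluding any words that contain a vowel.
--
--     Args:
--         words (list): A list of strings.
--
--     Returns:
--         str: A sentence where each word from the input list is added in alternating case.
--
--     Raises:
--         EmptyListException: If the input list is empty.
--     """
--     if not words:
--         raise EmptyListException()
--
--     vowels = 'aeiou'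
--     result = []
--     upper = True
--
--     for word in words:
--         if not any(char.lower() in vowels for char in word):
--             result.append(word.upper() if upper else word.lower())
--             upper = not upper
--
--     return ' '.join(result)
-- ===== SOURCE B (Python) =====
-- class EmptyListException(Exception):
--     """Custom exception for empty list."""
--     def __init__(self):
--         super().__init__("The list cannot be empty.")
--
-- def join_strings(words):
--     if not words:
--         raise EmptyListException()
--     kept = [w for w in words if not (set(w.lower()) & set('aeiou'))]
--     parts = []
--     for i in range(0, len(kept), 2):
--         parts.append(kept[i].upper())
--         if i + 1 < len(kept):
--             parts.append(kept[i + 1].lower())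
--     return ' '.join(parts)
-- ===== Notes on version B (the rewrite author's own statement) =====
-- stated objective: alternative
-- what changed: Filters vowel-free words by set-intersection emptiness (set(w.lower()) & set('aeiou')) instead of a per-char any-scan, then cases the kept words pairwise with a step-2 index loop emitting UPPER then lower per chunk, eliminating A's mutated boolean toggle entirely.
import Mathlib
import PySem

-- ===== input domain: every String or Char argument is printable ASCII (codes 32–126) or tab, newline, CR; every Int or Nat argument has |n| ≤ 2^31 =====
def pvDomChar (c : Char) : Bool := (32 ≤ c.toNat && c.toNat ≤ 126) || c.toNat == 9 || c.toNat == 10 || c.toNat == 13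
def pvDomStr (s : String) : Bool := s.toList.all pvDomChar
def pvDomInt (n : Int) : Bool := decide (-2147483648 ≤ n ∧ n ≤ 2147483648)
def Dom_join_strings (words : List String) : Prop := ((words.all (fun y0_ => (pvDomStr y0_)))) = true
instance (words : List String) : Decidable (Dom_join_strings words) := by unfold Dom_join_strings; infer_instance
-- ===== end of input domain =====

-- B filters by set-intersection emptiness and cases the kept words pairwise with a step-2 index
-- loop (UPPER then lower per chunk), replacing A's single loop with a toggled boolean.
-- Return-value equivalence only (A raises EmptyListException on [], excluded by Pre_; B raises there too).

-- ===== PORT A =====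
-- A's per-word test: 'not any(char.lower() in "aeiou" for char in word)'
def noVowelA (w : String) : Bool :=
  !(w.toList.any (fun c => ("aeiou".toList).contains (PySem.Chars.lowerChar c)))

def join_strings (words : List String) : String :=
  let st := words.foldl
    (fun (s : List String × Bool) word =>
      if noVowelA word then
        (s.1 ++ [if s.2 then PySem.Str.upper word else PySem.Str.lower word], !s.2)
      else s)
    ([], true)
  PySem.Str.join " " st.1

-- ===== PORT B =====
-- B's per-word test: 'not (set(w.lower()) & set("aeiou"))'  (emptiness of a set intersection)
def noVowelB (w : String) : Bool :=
  (PySem.Set.inter (PySem.Set.ofList (PySem.Str.lower w).toList)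
                   (PySem.Set.ofList "aeiou".toList)).isEmpty

def join_strings_alt (words : List String) : String :=
  let kept := words.filter noVowelB
  let parts := (PySem.List.pyRange 0 (kept.length : Int) 2).foldl
    (fun (parts : List String) i =>
      let parts := parts ++ [PySem.Str.upper (PySem.List.pyGetD kept i "")]
      if i + 1 < (kept.length : Int) then
        parts ++ [PySem.Str.lower (PySem.List.pyGetD kept (i + 1) "")]
      else parts)
    []
  PySem.Str.join " " parts

-- ===== PRECONDITION & SPEC =====
-- A raises EmptyListException on the empty list; Pre_ excludes exactly that input.
def Pre_join_strings (words : List String) : Prop := words ≠ []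
instance (words : List String) : Decidable (Pre_join_strings words) := by unfold Pre_join_strings; infer_instance
def pvWitness_join_strings : List String := ["Xz", "hello", "Gr!"]

def Spec_join_strings (words : List String) (out : String) : Prop := out = join_strings_alt words
instance (words : List String) (out : String) : Decidable (Spec_join_strings words out) := by unfold Spec_join_strings; infer_instance

-- ===== CLAIM =====
def Claim_equal_join_strings : Prop := ∀ (words : List String), Dom_join_strings words → Pre_join_strings words → Spec_join_strings words (join_strings words)

-- ===== LEMMAS AND PROOFS =====

-- the two vowel-freeness tests agree
theorem noVowel_eq (w : String) : noVowelA w = noVowelB w := by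
  unfold noVowelA noVowelB
  rcases h : (PySem.Set.inter (PySem.Set.ofList (PySem.Str.lower w).toList)
      (PySem.Set.ofList "aeiou".toList)).isEmpty with _ | _
  · -- intersection nonempty: some lowered char is a vowel
    simp only [List.isEmpty_eq_false_iff_exists_mem] at h
    obtain ⟨c, hc⟩ := h
    rw [PySem.Set.mem_inter] at hc
    obtain ⟨h1, h2⟩ := hc
    rw [PySem.Set.mem_ofList, PySem.Str.toList_lower, PySem.Chars.lower, List.mem_map] at h1
    obtain ⟨c0, hc0, rfl⟩ := h1
    rw [PySem.Set.mem_ofList] at h2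
    simp only [Bool.not_eq_false', List.any_eq_true]
    exact ⟨c0, hc0, by simpa using h2⟩
  · -- intersection empty: no lowered char is a vowel
    rw [List.isEmpty_iff] at h
    simp only [Bool.not_eq_true', List.any_eq_false]
    intro c hc
    by_contra hmem
    have : PySem.Chars.lowerChar c ∈
        PySem.Set.inter (PySem.Set.ofList (PySem.Str.lower w).toList)
          (PySem.Set.ofList "aeiou".toList) := by
      rw [PySem.Set.mem_inter, PySem.Set.mem_ofList, PySem.Set.mem_ofList,
          PySem.Str.toList_lower, PySem.Chars.lower]
      exact ⟨List.mem_map_of_mem hc, by simpa using hmem⟩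
    rw [h] at this
    exact absurd this (List.not_mem_nil)

-- the alternating-case list A's loop produces from the vowel-free words, as a structural recursion
def altCase : List String → Bool → List String
  | [], _ => []
  | w :: t, b => (if b then PySem.Str.upper w else PySem.Str.lower w) :: altCase t (!b)

theorem foldA_eq_altCase (ws : List String) (acc : List String) (b : Bool) :
    (ws.foldl
      (fun (s : List String × Bool) word =>
        if noVowelA word then
          (s.1 ++ [if s.2 then PySem.Str.upper word else PySem.Str.lower word], !s.2)
        else s)
      (acc, b)).1 = acc ++ altCase (ws.filter noVowelA) b := by
  induction ws generalizing acc b with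
  | nil => simp [altCase]
  | cons w t ih =>
    by_cases h : noVowelA w = true
    · simp [List.foldl, h, ih, altCase]
    · simp [List.foldl, h, ih]

-- altCase starting at 'upper', seen two words at a time (pairsB.induct drives the step-2 proof)
def pairsB : List String → List String
  | [] => []
  | [w] => [PySem.Str.upper w]
  | w1 :: w2 :: t => PySem.Str.upper w1 :: PySem.Str.lower w2 :: pairsB t

theorem altCase_true_eq_pairsB (ws : List String) : altCase ws true = pairsB ws := by
  induction ws using pairsB.induct with
  | case1 => rfl
  | case2 w => rfl
  | case3 w1 w2 t ih => simp [altCase, pairsB, ih]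

-- a step-2 range peels one element at a time
theorem pyRange_two_cons (a b : Int) (h : a < b) :
    PySem.List.pyRange a b 2 = a :: PySem.List.pyRange (a + 2) b 2 := by
  rw [PySem.List.pyRange_of_pos a b (by norm_num),
      PySem.List.pyRange_of_pos (a + 2) b (by norm_num)]
  have hn : (if a < b then ((b - a + 2 - 1) / 2).toNat else 0) =
      (if a + 2 < b then ((b - (a + 2) + 2 - 1) / 2).toNat else 0) + 1 := by
    by_cases h2 : a + 2 < b <;> simp [h, h2] <;> omega
  rw [hn, List.range_succ_eq_map]
  simp only [List.map_cons, List.map_map, Nat.cast_zero, mul_zero, add_zero]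
  congr 1
  apply List.map_congr_left
  intro k _
  simp only [Function.comp]
  push_cast
  ring

theorem pyRange_two_nil (a b : Int) (h : b ≤ a) : PySem.List.pyRange a b 2 = [] := by
  rw [PySem.List.pyRange_of_pos a b (by norm_num)]
  simp [show ¬ a < b by omega]

-- B's step-2 fold over any suffix 'rest' of kept (at offset pre.length) builds 'acc ++ pairsB rest'
theorem foldB_eq_pairsB (rest pre acc : List String) :
    (PySem.List.pyRange (pre.length : Int) ((pre.length + rest.length : Nat) : Int) 2).foldl
      (fun (parts : List String) i =>
        let parts := parts ++ [PySem.Str.upper (PySem.List.pyGetD (pre ++ rest) i "")]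
        if i + 1 < ((pre ++ rest).length : Int) then
          parts ++ [PySem.Str.lower (PySem.List.pyGetD (pre ++ rest) (i + 1) "")]
        else parts)
      acc = acc ++ pairsB rest := by
  induction rest using pairsB.induct generalizing pre acc with
  | case1 =>
    rw [pyRange_two_nil _ _ (by simp only [List.length_nil]; push_cast; omega)]
    simp [pairsB]
  | case2 w =>
    rw [pyRange_two_cons _ _ (by simp only [List.length_cons, List.length_nil]; push_cast; omega),
        pyRange_two_nil _ _ (by simp only [List.length_cons, List.length_nil]; push_cast; omega)]
    simp only [List.foldl_cons, List.foldl_nil]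
    have hget : PySem.List.pyGetD (pre ++ [w]) (pre.length : Int) "" = w := by
      rw [PySem.List.pyGetD_natCast]
      simp
    rw [hget]
    simp [pairsB]
  | case3 w1 w2 t ih =>
    rw [pyRange_two_cons _ _ (by simp only [List.length_cons]; push_cast; omega)]
    simp only [List.foldl_cons]
    have hg1 : PySem.List.pyGetD (pre ++ w1 :: w2 :: t) (pre.length : Int) "" = w1 := by
      rw [PySem.List.pyGetD_natCast]
      simp
    have hg2 : PySem.List.pyGetD (pre ++ w1 :: w2 :: t) ((pre.length : Int) + 1) "" = w2 := by
      rw [show ((pre.length : Int) + 1) = ((pre.length + 1 : Nat) : Int) by push_cast; ring,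
          PySem.List.pyGetD_natCast]
      rw [show pre ++ w1 :: w2 :: t = (pre ++ [w1]) ++ w2 :: t by simp]
      simp
    have hcond : (pre.length : Int) + 1 < ((pre ++ w1 :: w2 :: t).length : Int) := by
      simp only [List.length_append, List.length_cons]
      push_cast
      omega
    rw [hg1]
    simp only [hcond, if_pos, hg2]
    have hpre2 : pre ++ w1 :: w2 :: t = (pre ++ [w1, w2]) ++ t := by simp
    have hlen : ((pre.length : Int) + 2) = (((pre ++ [w1, w2]).length : Nat) : Int) := by
      simp only [List.length_append, List.length_cons, List.length_nil]
      push_cast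
      ring
    have hstop : ((pre.length + (w1 :: w2 :: t).length : Nat) : Int) =
        (((pre ++ [w1, w2]).length + t.length : Nat) : Int) := by
      simp only [List.length_append, List.length_cons, List.length_nil]
      push_cast
      ring
    rw [hlen, hstop, hpre2,
        ih (pre ++ [w1, w2]) (acc ++ [PySem.Str.upper w1] ++ [PySem.Str.lower w2])]
    simp [pairsB]

-- ===== VERDICT =====
theorem join_strings_spec : Claim_equal_join_strings := by
  intro words _ _
  show join_strings words = join_strings_alt words
  unfold join_strings join_strings_alt
  dsimp only
  rw [foldA_eq_altCase, List.nil_append, altCase_true_eq_pairsB,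
      List.filter_congr (fun w _ => noVowel_eq w)]
  congr 1
  have h := foldB_eq_pairsB (words.filter noVowelB) [] []
  simpa using h.symm
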